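-- pv_equiv track=rewrite | github.com/PassionDev206/10xbot | confirm/test.py | get_length_list
-- ===== SOURCE A (Python) =====
-- def get_length_list(data):
-- 	lens = []
-- 	temp = 0
-- 	for i in range(len(data)):
-- 		if data[i] < 2:
-- 			temp += 1
-- 		else:
-- 			lens.append(temp)
-- 			temp = 0
-- 	return lens
-- ===== SOURCE B (Python) =====
-- def get_length_list(data):
--     seps = [i for i, v in enumerate(data) if not (v < 2)]
--     lens = []
--     prev = -1
--     for p in seps:
--         lens.append(p - prev - 1)
--         prev = p
--     return lens
-- ===== Notes on version B (the rewrite author's own statement) =====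
-- stated objective: alternative
-- what changed: Replaces the live running counter with two passes: collect separator indices (values not < 2) via enumerate, then emit run lengths as differences of consecutive separator indices (the trailing run is dropped automatically since it has no closing separator).
import Mathlib
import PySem

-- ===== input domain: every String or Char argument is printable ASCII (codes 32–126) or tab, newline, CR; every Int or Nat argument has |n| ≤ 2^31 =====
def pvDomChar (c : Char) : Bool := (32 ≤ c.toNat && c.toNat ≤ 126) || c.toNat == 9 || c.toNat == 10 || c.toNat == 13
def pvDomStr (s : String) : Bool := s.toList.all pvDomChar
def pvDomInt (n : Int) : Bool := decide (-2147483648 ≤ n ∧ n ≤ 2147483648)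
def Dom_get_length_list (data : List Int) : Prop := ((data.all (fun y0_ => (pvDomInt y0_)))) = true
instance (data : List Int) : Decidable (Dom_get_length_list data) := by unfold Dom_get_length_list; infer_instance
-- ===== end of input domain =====

-- B computes the same run lengths by a different decomposition: collect separator
-- indices first, then emit gaps between consecutive separators (objective: alternative).

-- ===== PORT A =====
-- A's loop over range(len(data)) reads data[i] in order; ported as structural
-- recursion over the list carrying the same state (lens, temp).
def getLengthListLoop (rest : List Int) (lens : List Int) (temp : Int) : List Int :=
  match rest with
  | [] => lens
  | v :: rest' =>
    if v < 2 then getLengthListLoop rest' lens (temp + 1)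
    else getLengthListLoop rest' (lens ++ [temp]) 0

def get_length_list (data : List Int) : List Int :=
  getLengthListLoop data [] 0

-- ===== PORT B =====
-- seps = [i for i, v in enumerate(data) if not (v < 2)]
def sepsFrom (i : Int) (rest : List Int) : List Int :=
  match rest with
  | [] => []
  | v :: rest' => if ¬ (v < 2) then i :: sepsFrom (i + 1) rest' else sepsFrom (i + 1) rest'

-- for p in seps: lens.append(p - prev - 1); prev = p
def gapsLoop (seps : List Int) (lens : List Int) (prev : Int) : List Int :=
  match seps with
  | [] => lens
  | p :: ps => gapsLoop ps (lens ++ [p - prev - 1]) p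

def get_length_list_alt (data : List Int) : List Int :=
  gapsLoop (sepsFrom 0 data) [] (-1)

-- ===== PRECONDITION & SPEC =====
def Spec_get_length_list (data : List Int) (out : List Int) : Prop := out = get_length_list_alt data
instance (data : List Int) (out : List Int) : Decidable (Spec_get_length_list data out) := by unfold Spec_get_length_list; infer_instance

-- ===== CLAIM (what is proved, stated in full; the proofs are below) =====
def Claim_equal_get_length_list : Prop := ∀ (data : List Int), Dom_get_length_list data → Spec_get_length_list data (get_length_list data)

-- ===== LEMMAS AND PROOFS =====
theorem loop_eq_gaps (rest : List Int) : ∀ (i prev : Int) (lens : List Int),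
    getLengthListLoop rest lens (i - prev - 1) = gapsLoop (sepsFrom i rest) lens prev := by
  induction rest with
  | nil => intro i prev lens; simp [getLengthListLoop, sepsFrom, gapsLoop]
  | cons v rest' ih =>
    intro i prev lens
    by_cases h : v < 2
    · simp only [getLengthListLoop, sepsFrom, h, if_pos]
      have : i - prev - 1 + 1 = (i + 1) - prev - 1 := by ring
      rw [this, ih (i + 1) prev lens]
      simp
    · simp only [getLengthListLoop, sepsFrom, h]
      have h0 : (0 : Int) = (i + 1) - i - 1 := by ring
      rw [h0, ih (i + 1) i (lens ++ [i - prev - 1])]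
      simp [gapsLoop]

-- ===== VERDICT (by name: the statement is the Claim_ definition above) =====
theorem get_length_list_spec : Claim_equal_get_length_list := by
  intro data _
  unfold Spec_get_length_list get_length_list get_length_list_alt
  have := loop_eq_gaps data 0 (-1) []
  simpa using this
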